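-- pv_equiv track=rewrite | github.com/AustL/PygameWidgets | pygame_widgets/combobox.py | _defaultSearch
-- ===== SOURCE A (Python) =====
-- def _defaultSearch(text, choices):
--     """Return the suggestions of text in choices."""
--
--     # First add the ones that perfectly match case
--     suggestions = [
--         choice for choice in choices
--         if choice.startswith(text)
--     ]
--     # Then add the ones that include text
--     suggestions += [
--         choice for choice in choices
--         if text in choice and choice not in suggestions
--     ]
--     return suggestions
-- ===== SOURCE B (Python) =====
-- def _defaultSearch(text, choices):
--     """Return the suggestions of text in choices."""
--     prefix = []
--     substr = []
--     for choice in choices: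
--         if choice.startswith(text):
--             prefix.append(choice)
--         elif text in choice:
--             substr.append(choice)
--     return prefix + substr
-- ===== Notes on version B (the rewrite author's own statement) =====
-- stated objective: simpler
-- what changed: Replaces A's two comprehensions (the second rescanning the prefix list with 'choice not in suggestions') by a single pass that sorts each choice into a prefix bucket or a substring bucket; a prefix match can never be a substring-only match, so the membership test disappears.
import Mathlib
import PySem

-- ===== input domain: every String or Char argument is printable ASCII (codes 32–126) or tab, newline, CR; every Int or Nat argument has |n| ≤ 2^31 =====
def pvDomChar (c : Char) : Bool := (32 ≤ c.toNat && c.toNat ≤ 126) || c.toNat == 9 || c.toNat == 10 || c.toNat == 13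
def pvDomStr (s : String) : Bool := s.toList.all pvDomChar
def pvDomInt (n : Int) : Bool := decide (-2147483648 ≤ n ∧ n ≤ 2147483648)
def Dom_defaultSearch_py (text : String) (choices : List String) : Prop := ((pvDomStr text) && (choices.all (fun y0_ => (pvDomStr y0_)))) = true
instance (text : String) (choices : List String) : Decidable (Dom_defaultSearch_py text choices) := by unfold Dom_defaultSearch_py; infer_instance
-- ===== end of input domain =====

-- B does one pass with two buckets (prefix / substring-only) instead of A's two
-- comprehensions whose second rescans the prefix list; simpler, same values.

-- ===== PORT A =====
def defaultSearch_py (text : String) (choices : List String) : List String :=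
  let suggestions := choices.filter (fun choice => PySem.Str.startswith choice text)
  suggestions ++
    choices.filter (fun choice =>
      PySem.Str.isIn text choice && !(suggestions.contains choice))

-- ===== PORT B =====
def defaultSearch_py_alt (text : String) (choices : List String) : List String :=
  let acc := choices.foldl (fun (acc : List String × List String) choice =>
    if PySem.Str.startswith choice text then (acc.1 ++ [choice], acc.2)
    else if PySem.Str.isIn text choice then (acc.1, acc.2 ++ [choice])
    else acc) ([], [])
  acc.1 ++ acc.2

-- ===== PRECONDITION & SPEC =====
def Spec_defaultSearch_py (text : String) (choices : List String) (out : List String) : Prop := out = defaultSearch_py_alt text choices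
instance (text : String) (choices : List String) (out : List String) : Decidable (Spec_defaultSearch_py text choices out) := by unfold Spec_defaultSearch_py; infer_instance

-- ===== CLAIM (what is proved, stated in full; the proofs are below) =====
def Claim_equal_defaultSearch_py : Prop := ∀ (text : String) (choices : List String), Dom_defaultSearch_py text choices → Spec_defaultSearch_py text choices (defaultSearch_py text choices)

-- ===== LEMMAS AND PROOFS =====

-- B's loop splits the list into its prefix matches and its substring-only matches.
theorem alt_loop (text : String) (l p s : List String) :
    l.foldl (fun (acc : List String × List String) choice =>
      if PySem.Str.startswith choice text then (acc.1 ++ [choice], acc.2)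
      else if PySem.Str.isIn text choice then (acc.1, acc.2 ++ [choice])
      else acc) (p, s)
    = (p ++ l.filter (fun c => PySem.Str.startswith c text),
       s ++ l.filter (fun c => !PySem.Str.startswith c text && PySem.Str.isIn text c)) := by
  induction l generalizing p s with
  | nil => simp
  | cons c l ih =>
    simp only [List.foldl_cons, List.filter_cons]
    simp only [PySem.Str.startswith_eq, PySem.Str.isIn_eq] at ih
    by_cases h : PySem.Chars.startswith c.toList text.toList = true
    · simp [h, ih]
    · by_cases h2 : PySem.Chars.isIn text.toList c.toList = true
      · simp [h, h2, ih]
      · simp [h, h2, ih]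

-- ===== VERDICT (by name: the statement is the Claim_ definition above) =====
theorem defaultSearch_py_spec : Claim_equal_defaultSearch_py := by
  intro text choices _
  unfold Spec_defaultSearch_py defaultSearch_py defaultSearch_py_alt
  rw [alt_loop]
  simp only [List.nil_append]
  congr 1
  apply List.filter_congr
  intro c hc
  simp [hc, Bool.and_comm]
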